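-- pv_equiv track=rewrite | github.com/matsano/Teaching-Assistance-Program-MC102 | Exercise lists/Lista de Exercicios 5/Exercicio 3.py | menor_base_log
-- ===== SOURCE A (Python) =====
-- def divisores(n):
--     divisores = []
--
--     for i in range(2, n+1):
--         if n % i == 0:
--             divisores.append(i)
--
--     return divisores
--
-- def menor_base_log(n):
--     b = 0
--     divisores_n = divisores(n)
--
--     for i in range(len(divisores_n)):
--         k = 1
--         while divisores_n[i] ** k <= n:
--             if divisores_n[i]**k == n:
--                 b = divisores_n[i]
--                 break
--             k += 1
--         if b != 0:
--             break
--     return b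
-- ===== SOURCE B (Python) =====
-- def menor_base_log(n):
--     if n < 2:
--         return 0
--     b = 2
--     while b * b <= n:
--         p = b * b
--         while p <= n:
--             if p == n:
--                 return b
--             p *= b
--         b += 1
--     return n
-- ===== Notes on version B (the rewrite author's own statement) =====
-- stated objective: faster
-- what changed: B replaces A's divisor enumeration up to n (then power-testing each divisor) by a scan of candidate bases only up to sqrt(n) with an early return, falling back to n itself when no small base is a perfect root.
import Mathlib
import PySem

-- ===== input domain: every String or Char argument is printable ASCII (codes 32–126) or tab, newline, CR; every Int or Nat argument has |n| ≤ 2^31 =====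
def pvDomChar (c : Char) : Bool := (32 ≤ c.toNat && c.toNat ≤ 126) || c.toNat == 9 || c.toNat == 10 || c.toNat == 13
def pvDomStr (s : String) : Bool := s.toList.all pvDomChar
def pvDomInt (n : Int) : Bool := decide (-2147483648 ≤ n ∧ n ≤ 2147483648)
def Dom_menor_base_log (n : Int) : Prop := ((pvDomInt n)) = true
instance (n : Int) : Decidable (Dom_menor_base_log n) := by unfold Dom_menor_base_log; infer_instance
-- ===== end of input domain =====

-- B scans candidate bases 2..⌊√n⌋ (falling back to n itself), instead of A's
-- full divisor enumeration up to n; same return value, asymptotically faster.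

-- ===== PORT A =====
-- helper 'divisores': for i in range(2, n+1): if n % i == 0: divisores.append(i)
def pvDivisores (n : Int) : List Int :=
  (PySem.List.pyRange 2 (n+1) 1).foldl
    (fun acc i => if PySem.Int.mod n i = 0 then acc ++ [i] else acc) []

-- inner 'while divisores_n[i] ** k <= n' loop; b is 0 on entry, fuel only makes
-- the recursion total (it is large enough to never run out on the real inputs)
def pvAWhile (d n : Int) : Nat → Nat → Int
  | _, 0 => 0
  | k, fuel+1 =>
    if d ^ k ≤ n then
      (if d ^ k = n then d else pvAWhile d n (k+1) fuel)
    else 0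

-- outer 'for i in range(len(divisores_n))' with the 'if b != 0: break'
def pvALoop (n : Int) : List Int → Int
  | [] => 0
  | d :: rest =>
    let b := pvAWhile d n 1 (n.toNat + 1)
    if b ≠ 0 then b else pvALoop n rest

def menor_base_log (n : Int) : Int := pvALoop n (pvDivisores n)

-- ===== PORT B =====
-- inner 'while p <= n: if p == n: return b; p *= b' (fuel: totality only)
def pvPowHits (b n : Int) : Int → Nat → Bool
  | _, 0 => false
  | p, fuel+1 =>
    if p ≤ n then (if p = n then true else pvPowHits b n (p*b) fuel) else false

-- outer 'while b * b <= n' (fuel: totality only)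
def pvBLoop (n : Int) : Int → Nat → Int
  | _, 0 => 0
  | b, fuel+1 =>
    if b*b ≤ n then
      (if pvPowHits b n (b*b) (n.toNat + 1) then b else pvBLoop n (b+1) fuel)
    else n

def menor_base_log_alt (n : Int) : Int :=
  if n < 2 then 0 else pvBLoop n 2 (n.toNat + 1)

-- ===== PRECONDITION & SPEC =====
def Spec_menor_base_log (n : Int) (out : Int) : Prop := out = menor_base_log_alt n
instance (n : Int) (out : Int) : Decidable (Spec_menor_base_log n out) := by unfold Spec_menor_base_log; infer_instance

-- ===== CLAIM (what is proved, stated in full; the proofs are below) =====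
def Claim_equal_menor_base_log : Prop := ∀ (n : Int), Dom_menor_base_log n → Spec_menor_base_log n (menor_base_log n)

-- ===== LEMMAS AND PROOFS =====

-- 'b is an exact integer base of n': b ^ (k+1) = n for some k ≥ 0
def pvIsPow (b n : Int) : Prop := ∃ k : Nat, b ^ (k+1) = n

-- the value both programs return for n ≥ 2: the least base ≥ 2
def pvQ (n r : Int) : Prop :=
  2 ≤ r ∧ pvIsPow r n ∧ ∀ c, 2 ≤ c → pvIsPow c n → r ≤ c

theorem pvQ_unique {n r r' : Int} (h : pvQ n r) (h' : pvQ n r') : r = r' :=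
  le_antisymm (h.2.2 r' h'.1 h'.2.1) (h'.2.2 r h.1 h.2.1)

theorem pv_cast_lt_pow {d : Int} (hd : 2 ≤ d) (j : Nat) : (j : Int) < d ^ j := by
  calc (j : Int) < 2 ^ j := by exact_mod_cast Nat.lt_two_pow_self
    _ ≤ d ^ j := pow_le_pow_left₀ (by norm_num) hd j

theorem pvAWhile_pos {d n : Int} (hd : 2 ≤ d) :
    ∀ fuel k, (∃ j, k ≤ j ∧ d ^ j = n) → n.toNat < k + fuel →
      pvAWhile d n k fuel = d := by
  intro fuel
  induction fuel with
  | zero =>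
    intro k ⟨j, hkj, hj⟩ hfuel
    exfalso
    have hjn : (j : Int) < n := hj ▸ pv_cast_lt_pow hd j
    omega
  | succ fuel ih =>
    intro k ⟨j, hkj, hj⟩ hfuel
    have hle : d ^ k ≤ n := hj ▸ pow_le_pow_right₀ (by omega) hkj
    simp only [pvAWhile, if_pos hle]
    by_cases heq : d ^ k = n
    · simp [heq]
    · rw [if_neg heq]
      apply ih
      · refine ⟨j, ?_, hj⟩
        rcases lt_or_eq_of_le hkj with h | h
        · omega
        · exact absurd (h ▸ hj) heq
      · have hjn : (j : Int) < n := hj ▸ pv_cast_lt_pow hd j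
        have : k < j := by
          rcases lt_or_eq_of_le hkj with h | h
          · exact h
          · exact absurd (h ▸ hj) heq
        omega

theorem pvAWhile_neg {d n : Int} :
    ∀ fuel k, (∀ j, k ≤ j → d ^ j ≠ n) → pvAWhile d n k fuel = 0 := by
  intro fuel
  induction fuel with
  | zero => intro k _; rfl
  | succ fuel ih =>
    intro k hnone
    simp only [pvAWhile]
    split
    · rw [if_neg (hnone k le_rfl)]
      exact ih (k+1) (fun j hj => hnone j (by omega))
    · rfl

theorem pvDivisores_eq (n : Int) :
    pvDivisores n = (PySem.List.pyRange 2 (n+1) 1).filter (fun i => decide (PySem.Int.mod n i = 0)) := by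
  unfold pvDivisores
  rw [PySem.List.foldl_append_ite_eq_filter]
  simp

theorem pv_mem_divisores {n d : Int} :
    d ∈ pvDivisores n ↔ (2 ≤ d ∧ d < n + 1 ∧ d ∣ n) := by
  rw [pvDivisores_eq]
  simp [List.mem_filter, PySem.List.mem_pyRange_one, PySem.Int.mod_eq_zero_iff_dvd, and_assoc]

theorem pv_divisores_pairwise (n : Int) : (pvDivisores n).Pairwise (· < ·) := by
  rw [pvDivisores_eq]
  exact (PySem.List.pairwise_lt_pyRange_one 2 (n+1)).filter _

theorem pvIsPow_le {c n : Int} (hc : 2 ≤ c) (h : pvIsPow c n) : c ≤ n := by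
  obtain ⟨k, hk⟩ := h
  calc c = c ^ 1 := (pow_one c).symm
    _ ≤ c ^ (k+1) := pow_le_pow_right₀ (by omega) (by omega)
    _ = n := hk

theorem pvIsPow_mem {c n : Int} (hc : 2 ≤ c) (h : pvIsPow c n) : c ∈ pvDivisores n := by
  refine pv_mem_divisores.2 ⟨hc, by have := pvIsPow_le hc h; omega, ?_⟩
  obtain ⟨k, hk⟩ := h
  exact hk ▸ dvd_pow_self c (Nat.succ_ne_zero k)

theorem pvAWhile_isPow_pos {d n : Int} (hd : 2 ≤ d) (h : pvIsPow d n) :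
    pvAWhile d n 1 (n.toNat + 1) = d := by
  obtain ⟨k, hk⟩ := h
  apply pvAWhile_pos hd
  · exact ⟨k+1, by omega, hk⟩
  · omega

theorem pvAWhile_isPow_neg {d n : Int} (h : ¬ pvIsPow d n) :
    pvAWhile d n 1 (n.toNat + 1) = 0 := by
  apply pvAWhile_neg
  intro j hj hne
  exact h ⟨j - 1, by rwa [Nat.sub_add_cancel hj]⟩

theorem pvALoop_Q {n : Int} :
    ∀ l : List Int, l.Pairwise (· < ·) → (∀ d ∈ l, 2 ≤ d) →
      (∃ d ∈ l, pvIsPow d n) →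
      (pvALoop n l ∈ l ∧ pvIsPow (pvALoop n l) n ∧
        ∀ d ∈ l, pvIsPow d n → pvALoop n l ≤ d) := by
  intro l
  induction l with
  | nil => intro _ _ ⟨d, hd, _⟩; exact absurd hd (List.not_mem_nil)
  | cons d rest ih =>
    intro hpw h2 hex
    have hd2 : 2 ≤ d := h2 d List.mem_cons_self
    simp only [pvALoop]
    by_cases hp : pvIsPow d n
    · rw [pvAWhile_isPow_pos hd2 hp, if_pos (by omega)]
      refine ⟨List.mem_cons_self, hp, ?_⟩
      intro c hc _
      rcases List.mem_cons.1 hc with rfl | hc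
      · exact le_rfl
      · exact le_of_lt (List.rel_of_pairwise_cons hpw hc)
    · rw [pvAWhile_isPow_neg hp]
      simp only [ne_eq, not_true_eq_false, if_false]
      have hex' : ∃ c ∈ rest, pvIsPow c n := by
        obtain ⟨c, hc, hcp⟩ := hex
        rcases List.mem_cons.1 hc with rfl | hc
        · exact absurd hcp hp
        · exact ⟨c, hc, hcp⟩
      obtain ⟨hmem, hpow, hmin⟩ := ih (List.Pairwise.of_cons hpw)
        (fun c hc => h2 c (List.mem_cons_of_mem _ hc)) hex'
      refine ⟨List.mem_cons_of_mem _ hmem, hpow, ?_⟩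
      intro c hc hcp
      rcases List.mem_cons.1 hc with rfl | hc
      · exact absurd hcp hp
      · exact hmin c hc hcp

theorem pvA_Q {n : Int} (hn : 2 ≤ n) : pvQ n (menor_base_log n) := by
  have hnn : pvIsPow n n := ⟨0, pow_one n⟩
  have hmem : n ∈ pvDivisores n := pvIsPow_mem hn hnn
  obtain ⟨hm, hp, hmin⟩ := pvALoop_Q (pvDivisores n) (pv_divisores_pairwise n)
    (fun d hd => (pv_mem_divisores.1 hd).1) ⟨n, hmem, hnn⟩
  exact ⟨(pv_mem_divisores.1 hm).1, hp,
    fun c hc hcp => hmin c (pvIsPow_mem hc hcp) hcp⟩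

theorem pvPowHits_pos {b n : Int} (hb : 2 ≤ b) :
    ∀ fuel m, (∃ j, m ≤ j ∧ b ^ j = n) → n.toNat < m + fuel →
      pvPowHits b n (b ^ m) fuel = true := by
  intro fuel
  induction fuel with
  | zero =>
    intro m ⟨j, hmj, hj⟩ hfuel
    exfalso
    have : (j : Int) < n := hj ▸ pv_cast_lt_pow hb j
    omega
  | succ fuel ih =>
    intro m ⟨j, hmj, hj⟩ hfuel
    have hle : b ^ m ≤ n := hj ▸ pow_le_pow_right₀ (by omega) hmj
    simp only [pvPowHits, if_pos hle]
    by_cases heq : b ^ m = n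
    · simp [heq]
    · rw [if_neg heq, ← pow_succ]
      apply ih
      · refine ⟨j, ?_, hj⟩
        rcases lt_or_eq_of_le hmj with h | h
        · omega
        · exact absurd (h ▸ hj) heq
      · have hjn : (j : Int) < n := hj ▸ pv_cast_lt_pow hb j
        have : m < j := by
          rcases lt_or_eq_of_le hmj with h | h
          · exact h
          · exact absurd (h ▸ hj) heq
        omega

theorem pvPowHits_neg {b n : Int} :
    ∀ fuel m, (∀ j, m ≤ j → b ^ j ≠ n) → pvPowHits b n (b ^ m) fuel = false := by
  intro fuel
  induction fuel with
  | zero => intro m _; rfl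
  | succ fuel ih =>
    intro m hnone
    simp only [pvPowHits]
    split
    · rw [if_neg (hnone m le_rfl), ← pow_succ]
      exact ih (m+1) (fun j hj => hnone j (by omega))
    · rfl

theorem pvPowHits_isPow2 {b n : Int} (hb : 2 ≤ b) :
    pvPowHits b n (b*b) (n.toNat + 1) = true ↔ ∃ j, 2 ≤ j ∧ b ^ j = n := by
  have hbb : b * b = b ^ 2 := (sq b).symm
  constructor
  · intro h
    by_contra hno
    push Not at hno
    rw [hbb, pvPowHits_neg (n.toNat + 1) 2 (fun j hj => hno j hj)] at h
    exact absurd h (by simp)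
  · intro ⟨j, hj2, hj⟩
    rw [hbb]
    apply pvPowHits_pos hb
    · exact ⟨j, hj2, hj⟩
    · omega

theorem pvBLoop_Q {n : Int} (hn : 2 ≤ n) :
    ∀ fuel (b : Int), 2 ≤ b → b ≤ n + 1 → (n+1).toNat < b.toNat + fuel →
      (∀ c, 2 ≤ c → c < b → ¬ pvIsPow c n) →
      pvQ n (pvBLoop n b fuel) := by
  intro fuel
  induction fuel with
  | zero => intro b hb hble hfuel _; exfalso; omega
  | succ fuel ih =>
    intro b hb hble hfuel hprev
    simp only [pvBLoop]
    by_cases hbb : b * b ≤ n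
    · rw [if_pos hbb]
      by_cases hhit : pvPowHits b n (b*b) (n.toNat + 1) = true
      · rw [if_pos hhit]
        obtain ⟨j, hj2, hj⟩ := (pvPowHits_isPow2 hb).1 hhit
        refine ⟨hb, ⟨j - 1, by rwa [Nat.sub_add_cancel (by omega)]⟩, ?_⟩
        intro c hc hcp
        by_contra hlt
        exact hprev c hc (by omega) hcp
      · rw [if_neg hhit]
        have hbn : b < n := by nlinarith
        apply ih (b+1) (by omega) (by omega)
        · have h1 : (b+1).toNat = b.toNat + 1 := by omega
          omega
        · intro c hc hcb
          rcases lt_or_eq_of_le (by omega : c ≤ b) with h | h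
          · exact hprev c hc h
          · subst h
            intro ⟨k, hk⟩
            cases k with
            | zero => rw [pow_one] at hk; omega
            | succ k =>
              apply hhit
              exact (pvPowHits_isPow2 hb).2 ⟨k + 2, by omega, hk⟩
    · rw [if_neg hbb]
      refine ⟨hn, ⟨0, pow_one n⟩, ?_⟩
      intro c hc hcp
      obtain ⟨k, hk⟩ := hcp
      cases k with
      | zero => rw [pow_one] at hk; omega
      | succ k =>
        exfalso
        rcases lt_or_ge c b with h | h
        · exact hprev c hc h ⟨k+1, hk⟩
        · have hcc : c * c ≤ n := by
            calc c * c = c ^ 2 := (sq c).symm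
              _ ≤ c ^ (k+1+1) := pow_le_pow_right₀ (by omega) (by omega)
              _ = n := hk
          nlinarith

theorem pvB_Q {n : Int} (hn : 2 ≤ n) : pvQ n (menor_base_log_alt n) := by
  unfold menor_base_log_alt
  rw [if_neg (by omega)]
  apply pvBLoop_Q hn
  · norm_num
  · omega
  · omega
  · intro c hc hcb _; omega

theorem pvA_small {n : Int} (hn : n < 2) : menor_base_log n = 0 := by
  unfold menor_base_log
  rw [pvDivisores_eq, PySem.List.pyRange_one_eq_nil (by omega)]
  rfl

-- ===== VERDICT (by name: the statement is the Claim_ definition above) =====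
theorem menor_base_log_spec : Claim_equal_menor_base_log := by
  intro n _
  unfold Spec_menor_base_log
  rcases lt_or_ge n 2 with hn | hn
  · rw [pvA_small hn]
    unfold menor_base_log_alt
    rw [if_pos hn]
  · exact pvQ_unique (pvA_Q hn) (pvB_Q hn)
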